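-- pv_equiv track=rewrite | github.com/EyreC/PythonCiphers | encoder.py | uniqueChecker
-- ===== SOURCE A (Python) =====
-- def uniqueChecker(listOfNumbers):
--     newList = []
--     for num in listOfNumbers:
--         num2 = num^2
--         newList.append(num2)
--     if len(newList) == len(set(newList)):
--         return True
--     else:
--         return False
-- ===== SOURCE B (Python) =====
-- def uniqueChecker(listOfNumbers):
--     xored = sorted(num ^ 2 for num in listOfNumbers)
--     return all(a != b for a, b in zip(xored, xored[1:]))
-- ===== Notes on version B (the rewrite author's own statement) =====
-- stated objective: alternative
-- what changed: Replaces A's build-a-list-then-compare-len(set) uniqueness test with sorting the XORed values and scanning adjacent pairs for an equal neighbour.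
import Mathlib
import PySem

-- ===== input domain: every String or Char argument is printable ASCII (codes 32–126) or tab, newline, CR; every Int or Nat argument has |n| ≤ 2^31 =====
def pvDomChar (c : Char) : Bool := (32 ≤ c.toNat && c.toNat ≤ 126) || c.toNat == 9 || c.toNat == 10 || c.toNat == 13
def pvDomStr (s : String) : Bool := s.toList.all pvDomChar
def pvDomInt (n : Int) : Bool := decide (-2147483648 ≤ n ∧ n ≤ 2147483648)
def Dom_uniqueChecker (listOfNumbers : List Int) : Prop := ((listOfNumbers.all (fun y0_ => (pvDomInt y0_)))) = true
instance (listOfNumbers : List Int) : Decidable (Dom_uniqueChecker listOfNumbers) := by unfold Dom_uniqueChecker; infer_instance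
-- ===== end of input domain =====

-- B replaces A's len(set)-comparison uniqueness test with a sort-then-adjacent-scan (alternative algorithm, same results).

-- ===== PORT A =====
def uniqueChecker (listOfNumbers : List Int) : Bool :=
  -- newList = []; for num in listOfNumbers: newList.append(num ^ 2)
  let newList := listOfNumbers.foldl (fun acc num => acc ++ [PySem.Int.bxor num 2]) []
  -- if len(newList) == len(set(newList)): return True else: return False
  if newList.length = PySem.Set.len (PySem.Set.ofList newList) then true else false

-- ===== PORT B =====
def uniqueChecker_alt (listOfNumbers : List Int) : Bool :=
  -- xored = sorted(num ^ 2 for num in listOfNumbers)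
  let xored := PySem.List.sorted (listOfNumbers.map (fun num => PySem.Int.bxor num 2)) (fun x => x) false
  -- all(a != b for a, b in zip(xored, xored[1:]))  (xored[1:] = drop 1, exact for this nonnegative slice)
  (xored.zip (xored.drop 1)).all (fun p => p.1 != p.2)

-- ===== PRECONDITION & SPEC =====
def Spec_uniqueChecker (listOfNumbers : List Int) (out : Bool) : Prop := out = uniqueChecker_alt listOfNumbers
instance (listOfNumbers : List Int) (out : Bool) : Decidable (Spec_uniqueChecker listOfNumbers out) := by unfold Spec_uniqueChecker; infer_instance

-- ===== CLAIM (what is proved, stated in full; the proofs are below) =====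
def Claim_equal_uniqueChecker : Prop := ∀ (listOfNumbers : List Int), Dom_uniqueChecker listOfNumbers → Spec_uniqueChecker listOfNumbers (uniqueChecker listOfNumbers)

-- ===== LEMMAS AND PROOFS =====

-- A's append loop builds the mapped list.
theorem pv_foldl_append_map (l : List Int) (acc : List Int) :
    l.foldl (fun acc num => acc ++ [PySem.Int.bxor num 2]) acc
      = acc ++ l.map (fun num => PySem.Int.bxor num 2) := by
  induction l generalizing acc with
  | nil => simp
  | cons x xs ih => simp [List.foldl, ih]

-- set(xs) is a sublist of xs.
theorem pv_ofList_sublist {α : Type} [BEq α] [LawfulBEq α] (l : List α) :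
    (PySem.Set.ofList l).Sublist l := by
  induction l with
  | nil => simp [PySem.Set.ofList_nil]
  | cons x xs ih =>
      rw [PySem.Set.ofList_cons]
      exact List.Sublist.cons₂ x (List.filter_sublist.trans ih)

-- len(xs) == len(set(xs)) iff xs has no duplicates.
theorem pv_len_eq_iff_nodup (l : List Int) :
    l.length = (PySem.Set.ofList l).length ↔ l.Nodup := by
  constructor
  · intro h
    have he : PySem.Set.ofList l = l := (pv_ofList_sublist l).eq_of_length h.symm
    simpa [he] using PySem.Set.nodup_ofList (xs := l)
  · intro h
    rw [PySem.Set.ofList_eq_self_of_nodup l h]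

-- On a ≤-sorted list, no adjacent pair is equal iff the list has no duplicates.
theorem pv_adjacent_iff_nodup (s : List Int) (hs : s.Pairwise (· ≤ ·)) :
    ((s.zip (s.drop 1)).all (fun p => p.1 != p.2)) = true ↔ s.Nodup := by
  induction s with
  | nil => simp
  | cons a t ih =>
      cases t with
      | nil => simp
      | cons b u =>
          have hab : a ≤ b := (List.pairwise_cons.mp hs).1 b (by simp)
          have hs' : (b :: u).Pairwise (· ≤ ·) := (List.pairwise_cons.mp hs).2
          have ih' := ih hs'
          simp only [List.drop_one, List.tail_cons, List.zip_cons_cons, List.all_cons,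
            Bool.and_eq_true, bne_iff_ne, ne_eq, decide_eq_true_eq] at *
          constructor
          · rintro ⟨hne, hrest⟩
            have hnd : (b :: u).Nodup := ih'.mp hrest
            refine List.nodup_cons.mpr ⟨?_, hnd⟩
            intro hmem
            have hlt : a < b := lt_of_le_of_ne hab hne
            rcases List.mem_cons.mp hmem with h | h
            · exact absurd h.symm (ne_of_gt hlt)
            · have : b ≤ a := (List.pairwise_cons.mp hs').1 a h
              omega
          · intro hnd
            have hnd' := List.nodup_cons.mp hnd
            exact ⟨fun h => hnd'.1 (h ▸ List.mem_cons_self), ih'.mpr hnd'.2⟩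

-- ===== VERDICT (by name: the statement is the Claim_ definition above) =====
theorem uniqueChecker_spec : Claim_equal_uniqueChecker := by
  intro l _
  unfold Spec_uniqueChecker uniqueChecker uniqueChecker_alt
  set m := l.map (fun num => PySem.Int.bxor num 2) with hm
  rw [pv_foldl_append_map, List.nil_append, ← hm]
  set s := PySem.List.sorted m (fun x => x) false with hsdef
  have hperm : s.Perm m := PySem.List.sorted_perm m (fun x => x) false
  have hpair : s.Pairwise (· ≤ ·) := PySem.List.sorted_pairwise m (fun x => x)
  have hB := pv_adjacent_iff_nodup s hpair
  have hA : ((m.length : Int) = ((PySem.Set.ofList m).length : Int)) ↔ m.Nodup := by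
    rw [Int.natCast_inj]; exact pv_len_eq_iff_nodup m
  simp only [PySem.Set.len]
  by_cases hnd : m.Nodup
  · rw [if_pos (hA.mpr hnd), (hB.mpr (hperm.nodup_iff.mpr hnd))]
  · rw [if_neg (fun h => hnd (hA.mp h))]
    cases hcase : (s.zip (s.drop 1)).all (fun p => p.1 != p.2) with
    | false => rfl
    | true => exact absurd (hperm.nodup_iff.mp (hB.mp hcase)) hnd
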